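-- pv_equiv track=rewrite | github.com/BaljaaSS/AdventOfCode | 2021/Methods.py | FindCo2Rate
-- ===== SOURCE A (Python) =====
-- def get_index_positions(list_of_elems, element):
--     ''' Returns the indexes of all occurrences of give element in
--     the list- listOfElements '''
--     index_pos_list = []
--     index_pos = 0
--     while True:
--         try:
--             # Search for item in list from indexPos to the end of list
--             index_pos = list_of_elems.index(element, index_pos)
--             # Add the index position in list
--             index_pos_list.append(index_pos)
--             index_pos += 1
--         except ValueError as e:
--             break
--     return index_pos_list
--
-- def FindCo2Rate(lines, it):
--     num = [lip[it] for lip in lines]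
--     one = num.count('1')
--     zero = num.count('0')
--     if one >= zero:
--         ind = get_index_positions(num, '0')
--     else:
--         ind = get_index_positions(num, '1')
--     return [lines[i] for i in ind]
-- ===== SOURCE B (Python) =====
-- def FindCo2Rate(lines, it):
--     num = [l[it] for l in lines]
--     target = '0' if num.count('1') >= num.count('0') else '1'
--     return [l for l in lines if l[it] == target]
-- ===== Notes on version B (the rewrite author's own statement) =====
-- stated objective: simpler
-- what changed: Drops the get_index_positions helper and the index-list-then-gather (collect positions with repeated list.index, then map indexes back to lines): B just picks the target bit from the counts and filters the lines directly in one pass.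
import Mathlib
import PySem

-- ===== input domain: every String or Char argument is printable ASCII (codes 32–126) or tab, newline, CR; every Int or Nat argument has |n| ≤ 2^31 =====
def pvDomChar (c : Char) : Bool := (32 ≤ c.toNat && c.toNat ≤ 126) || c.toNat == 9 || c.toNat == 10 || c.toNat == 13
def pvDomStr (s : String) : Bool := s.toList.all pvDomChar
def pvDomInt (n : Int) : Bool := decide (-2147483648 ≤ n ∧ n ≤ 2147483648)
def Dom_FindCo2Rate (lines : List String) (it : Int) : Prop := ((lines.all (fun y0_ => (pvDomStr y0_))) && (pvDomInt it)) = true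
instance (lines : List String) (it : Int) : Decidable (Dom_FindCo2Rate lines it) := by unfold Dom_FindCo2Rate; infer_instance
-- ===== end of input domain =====

-- B replaces A's index-collection helper and index→line gather with a direct one-pass filter of the lines (simpler).


-- ===== PORT A =====
-- get_index_positions: repeated list.index(e, index_pos) from the last hit + 1, collecting hits
def gipLoop (xs : List Char) (e : Char) (start : Nat) : List Nat :=
  match h : PySem.List.index? (xs.drop start) e with
  | none => []
  | some k => (start + k) :: gipLoop xs e (start + k + 1)
termination_by xs.length - start
decreasing_by
  have hk : k < (xs.drop start).length := by
    obtain ⟨pre, suf, hx, hl, _⟩ := (PySem.List.index?_eq_some_iff _ _ _).mp h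
    subst hl; rw [hx]; simp
  simp only [List.length_drop] at hk
  omega

def getIndexPositions (xs : List Char) (e : Char) : List Nat := gipLoop xs e 0

def FindCo2Rate (lines : List String) (it : Int) : List String :=
  match lines.mapM (fun lip => PySem.Str.pyGet? lip it) with
  | none => []  -- IndexError in the comprehension; excluded by Pre_
  | some num =>
    let one := num.count '1'
    let zeros := num.count '0'
    let ind := if one ≥ zeros then getIndexPositions num '0' else getIndexPositions num '1'
    ind.map (fun (i : Nat) => (PySem.List.pyGet? lines (i : Int)).getD "")

-- ===== PORT B =====
def FindCo2Rate_alt (lines : List String) (it : Int) : List String :=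
  match lines.mapM (fun l => PySem.Str.pyGet? l it) with
  | none => []  -- IndexError in the comprehension; excluded by Pre_
  | some num =>
    let target := if num.count '1' ≥ num.count '0' then '0' else '1'
    lines.filter (fun l => PySem.Str.pyGet? l it == some target)

-- ===== PRECONDITION & SPEC =====
-- Pre_ excludes exactly the inputs where A's comprehension lines[i][it] raises IndexError.
def Pre_FindCo2Rate (lines : List String) (it : Int) : Prop :=
  ∀ l ∈ lines, PySem.Raise.InRange l.length it
instance (lines : List String) (it : Int) : Decidable (Pre_FindCo2Rate lines it) := by
  unfold Pre_FindCo2Rate; infer_instance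
def pvWitness_FindCo2Rate : List String × Int := (["011", "100", "110"], 0)

def Spec_FindCo2Rate (lines : List String) (it : Int) (out : List String) : Prop := out = FindCo2Rate_alt lines it
instance (lines : List String) (it : Int) (out : List String) : Decidable (Spec_FindCo2Rate lines it out) := by unfold Spec_FindCo2Rate; infer_instance

-- ===== CLAIM (what is proved, stated in full; the proofs are below) =====
def Claim_equal_FindCo2Rate : Prop := ∀ (lines : List String) (it : Int), Dom_FindCo2Rate lines it → Pre_FindCo2Rate lines it → Spec_FindCo2Rate lines it (FindCo2Rate lines it)

-- ===== LEMMAS AND PROOFS =====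

/-- Positions of `e` in `suf`, offset by `off` (proof-side reference form). -/
def posList (suf : List Char) (e : Char) (off : Nat) : List Nat :=
  match suf with
  | [] => []
  | c :: cs => if c = e then off :: posList cs e (off + 1) else posList cs e (off + 1)

lemma posList_not_mem (suf : List Char) (e : Char) (off : Nat) (h : e ∉ suf) :
    posList suf e off = [] := by
  induction suf generalizing off with
  | nil => rfl
  | cons c cs ih =>
    simp only [List.mem_cons, not_or] at h
    simp [posList, Ne.symm h.1, ih off.succ h.2]

lemma posList_split (pre suf : List Char) (e : Char) (off : Nat) (h : e ∉ pre) :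
    posList (pre ++ e :: suf) e off = (off + pre.length) :: posList suf e (off + pre.length + 1) := by
  induction pre generalizing off with
  | nil => simp [posList]
  | cons c cs ih =>
    simp only [List.mem_cons, not_or] at h
    rw [List.cons_append, posList, if_neg (Ne.symm h.1), ih (off + 1) h.2, List.length_cons]
    have h1 : off + 1 + cs.length = off + (cs.length + 1) := by omega
    rw [h1]

lemma gipLoop_eq_posList (xs : List Char) (e : Char) (start : Nat) :
    gipLoop xs e start = posList (xs.drop start) e start := by
  induction hs : xs.length - start using Nat.strong_induction_on generalizing start with
  | _ n ih =>
    rw [gipLoop]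
    cases h : PySem.List.index? (xs.drop start) e with
    | none =>
      rw [posList_not_mem _ _ _ ((PySem.List.index?_eq_none_iff _ _).mp h)]
    | some k =>
      obtain ⟨pre, suf, hx, hl, hmem⟩ := (PySem.List.index?_eq_some_iff _ _ _).mp h
      subst hl
      have hk : pre.length < xs.length - start := by
        have h1 := congrArg List.length hx
        simp at h1
        omega
      have hdrop : xs.drop (start + pre.length + 1) = suf := by
        have h2 : xs.drop (start + pre.length + 1) = (xs.drop start).drop (pre.length + 1) := by
          rw [List.drop_drop]; ring_nf
        rw [h2, hx]; simp
      show (start + pre.length) :: gipLoop xs e (start + pre.length + 1) =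
        posList (xs.drop start) e start
      rw [hx, posList_split _ _ _ _ hmem,
        ih (xs.length - (start + pre.length + 1)) (by omega) (start + pre.length + 1) rfl, hdrop]

/-- Gathering lines at the positions of `e` in the column equals filtering lines by the column char. -/
lemma gather_eq_filter (L ls : List String) (cs : List Char) (e : Char) (it : Int) (off : Nat)
    (hdrop : L.drop off = ls)
    (hmap : ls.mapM (fun l => PySem.List.pyGet? l.toList it) = some cs) :
    (posList cs e off).map (fun (i : Nat) => (PySem.List.pyGet? L (i : Int)).getD "") =
      ls.filter (fun l => PySem.List.pyGet? l.toList it == some e) := by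
  induction ls generalizing cs off with
  | nil =>
    rw [List.mapM_nil] at hmap
    obtain rfl : cs = [] := by simpa using hmap.symm
    rfl
  | cons l ls' ih =>
    rw [List.mapM_cons] at hmap
    cases hc : PySem.List.pyGet? l.toList it with
    | none => rw [hc] at hmap; simp at hmap
    | some c =>
      rw [hc] at hmap
      cases hcs : List.mapM (fun l => PySem.List.pyGet? l.toList it) ls' with
      | none => rw [hcs] at hmap; simp at hmap
      | some cs' =>
        rw [hcs] at hmap
        obtain rfl : cs = c :: cs' := by simpa using hmap.symm
        have hoff : off < L.length := by
          by_contra hge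
          rw [List.drop_eq_nil_of_le (by omega)] at hdrop
          simp at hdrop
        have hLoff : PySem.List.pyGet? L (off : Int) = some l := by
          rw [PySem.List.pyGet?_natCast, ← List.head?_drop, hdrop, List.head?_cons]
        have hdrop' : L.drop (off + 1) = ls' := by
          have h2 : L.drop (off + 1) = (L.drop off).drop 1 := by rw [List.drop_drop]
          rw [h2, hdrop, List.drop_one, List.tail_cons]
        by_cases hce : c = e
        · subst hce
          simp only [posList, List.map_cons, List.filter_cons, hc,
            beq_self_eq_true, if_pos, hLoff, Option.getD_some]
          rw [ih cs' (off + 1) hdrop' hcs]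
        · rw [List.filter_cons, hc]
          have hne : (some c == some e) = false := by simp [hce]
          rw [hne]
          simp only [posList, if_neg hce]
          exact ih cs' (off + 1) hdrop' hcs

-- ===== VERDICT (by name: the statement is the Claim_ definition above) =====
theorem FindCo2Rate_spec : Claim_equal_FindCo2Rate := by
  intro lines it _ _
  unfold Spec_FindCo2Rate FindCo2Rate FindCo2Rate_alt
  simp only [PySem.Str.pyGet?_eq, PySem.Chars.pyGet?_eq_listPyGet?]
  cases h : lines.mapM (fun l => PySem.List.pyGet? l.toList it) with
  | none => rfl
  | some num =>
    simp only [getIndexPositions, gipLoop_eq_posList, List.drop_zero]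
    by_cases hge : num.count '1' ≥ num.count '0'
    · rw [if_pos hge, if_pos hge, gather_eq_filter lines lines num '0' it 0 (by simp) h]
    · rw [if_neg hge, if_neg hge, gather_eq_filter lines lines num '1' it 0 (by simp) h]
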